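-- pv_equiv track=rewrite | github.com/mohammadsafdar-netizen/Accord-Model-Building | Custom_model_fa_pf/form_reader.py | _detect_form_number
-- ===== SOURCE A (Python) =====
-- from typing import Any, Dict, List, Optional, Tuple
--
-- _FORM_SIGNATURES = {
--     "125": {"NamedInsured_FullName", "Policy_EffectiveDate", "LOB_"},
--     "127": {"Driver_GivenName", "Vehicle_VIN", "Driver_BirthDate"},
--     "137": {"Vehicle_Coverage_", "BusinessAutoSymbol_"},
--     "163": {"Text15[0]", "Text13[0]", "marital[0]"},
-- }
--
-- def _detect_form_number(field_names: set) -> Optional[str]: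
--     """Auto-detect ACORD form number from field name patterns."""
--     best_match = None
--     best_score = 0
--
--     for form_num, signatures in _FORM_SIGNATURES.items():
--         score = 0
--         for sig in signatures:
--             if any(sig in fn for fn in field_names):
--                 score += 1
--         if score > best_score:
--             best_score = score
--             best_match = form_num
--
--     return best_match if best_score >= 2 else None
-- ===== SOURCE B (Python) =====
-- from typing import Any, Dict, List, Optional, Tuple
--
-- _FORM_SIGNATURES = {
--     "125": {"NamedInsured_FullName", "Policy_EffectiveDate", "LOB_"},
--     "127": {"Driver_GivenName", "Vehicle_VIN", "Driver_BirthDate"},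
--     "137": {"Vehicle_Coverage_", "BusinessAutoSymbol_"},
--     "163": {"Text15[0]", "Text13[0]", "marital[0]"},
-- }
--
-- def _detect_form_number(field_names: set) -> Optional[str]:
--     """Auto-detect ACORD form number from field name patterns."""
--     # Single pass over the field names building ONE global set of matched signatures
--     # (signatures are distinct across forms), instead of per-form counting loops.
--     hit = set()
--     for fn in field_names:
--         for sigs in _FORM_SIGNATURES.values():
--             for sig in sigs:
--                 if sig in fn:
--                     hit.add(sig)
--     # Staged selection: score each form by set intersection, then pick the first
--     # maximum via max()/index() (first maximum = A's strict '>' tie-break).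
--     forms = list(_FORM_SIGNATURES)
--     scores = [len(sigs & hit) for sigs in _FORM_SIGNATURES.values()]
--     best = max(scores)
--     return forms[scores.index(best)] if best >= 2 else None
-- ===== Notes on version B (the rewrite author's own statement) =====
-- stated objective: alternative
-- what changed: A counts, per form, how many of its signatures any field name contains, tracking the running best in an accumulator; B makes one global pass over the field names collecting the set of all matched signatures, scores each form by set intersection with that set, and selects the first maximum via max()/index() with a final >=2 threshold.
import Mathlib
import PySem

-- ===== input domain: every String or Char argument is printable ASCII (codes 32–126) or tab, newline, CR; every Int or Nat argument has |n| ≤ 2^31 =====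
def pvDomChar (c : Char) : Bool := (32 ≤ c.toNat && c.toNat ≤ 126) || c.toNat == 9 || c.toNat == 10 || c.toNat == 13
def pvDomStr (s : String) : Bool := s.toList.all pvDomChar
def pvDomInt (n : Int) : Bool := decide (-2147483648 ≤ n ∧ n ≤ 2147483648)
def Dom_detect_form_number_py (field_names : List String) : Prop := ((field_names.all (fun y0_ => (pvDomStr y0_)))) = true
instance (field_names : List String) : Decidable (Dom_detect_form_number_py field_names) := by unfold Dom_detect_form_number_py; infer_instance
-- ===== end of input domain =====

-- B replaces A's per-form counting accumulator with one global pass collecting the set of matched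
-- signatures, per-form set intersections, and max()/index() selection (objective: alternative).

-- the module constant _FORM_SIGNATURES (dict of form → signature set), in insertion order
def pvSigTable : List (String × List String) :=
  [("125", ["NamedInsured_FullName", "Policy_EffectiveDate", "LOB_"]),
   ("127", ["Driver_GivenName", "Vehicle_VIN", "Driver_BirthDate"]),
   ("137", ["Vehicle_Coverage_", "BusinessAutoSymbol_"]),
   ("163", ["Text15[0]", "Text13[0]", "marital[0]"])]

-- ===== PORT A =====
def detect_form_number_py (field_names : List String) : Option String :=
  let r := pvSigTable.foldl (fun (acc : Option String × Int) p =>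
      let score := p.2.foldl (fun s sig =>
        if field_names.any (fun fn => PySem.Str.isIn sig fn) then s + 1 else s) (0 : Int)
      if score > acc.2 then (some p.1, score) else acc) (none, 0)
  if r.2 ≥ 2 then r.1 else none

-- ===== PORT B =====
-- the global matched-signature set: for fn in field_names: for sigs in values: for sig in sigs: if sig in fn: hit.add(sig)
def pvHit (field_names : List String) : PySem.Set String :=
  field_names.foldl (fun s fn =>
    pvSigTable.foldl (fun s p =>
      p.2.foldl (fun s sig => if PySem.Str.isIn sig fn then PySem.Set.add s sig else s) s) s)
    PySem.Set.empty

def detect_form_number_py_alt (field_names : List String) : Option String :=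
  let hit := pvHit field_names
  let forms := pvSigTable.map Prod.fst
  let scores := pvSigTable.map (fun p => PySem.Set.len (PySem.Set.inter p.2 hit))
  match PySem.List.max? scores (fun x => x) with
  | none => none          -- unreachable: scores is nonempty
  | some best =>
    if best ≥ 2 then
      match PySem.List.index? scores best with
      | some i => PySem.List.pyGet? forms (Int.ofNat i)   -- forms[scores.index(best)], always in range
      | none => none      -- unreachable: best ∈ scores
    else none

-- ===== PRECONDITION & SPEC =====
def Spec_detect_form_number_py (field_names : List String) (out : Option String) : Prop := out = detect_form_number_py_alt field_names
instance (field_names : List String) (out : Option String) : Decidable (Spec_detect_form_number_py field_names out) := by unfold Spec_detect_form_number_py; infer_instance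

-- ===== CLAIM (what is proved, stated in full; the proofs are below) =====
def Claim_equal_detect_form_number_py : Prop := ∀ (field_names : List String), Dom_detect_form_number_py field_names → Spec_detect_form_number_py field_names (detect_form_number_py field_names)

-- ===== LEMMAS AND PROOFS =====

-- membership after one field name's inner fold over one form's signatures
lemma mem_condAdd (sigs : List String) (fn : String) (s : PySem.Set String) (y : String) :
    y ∈ sigs.foldl (fun s sig => if PySem.Str.isIn sig fn then PySem.Set.add s sig else s) s ↔
      y ∈ s ∨ (y ∈ sigs ∧ PySem.Str.isIn y fn) := by
  induction sigs generalizing s with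
  | nil => simp
  | cons a t ih =>
    simp only [List.foldl_cons, ih, List.mem_cons]
    by_cases h : PySem.Str.isIn a fn = true
    · simp only [if_pos h, PySem.Set.mem_add]
      constructor
      · rintro (⟨hs | rfl⟩ | ⟨ht, hy⟩)
        · exact Or.inl hs
        · exact Or.inr ⟨Or.inl rfl, h⟩
        · exact Or.inr ⟨Or.inr ht, hy⟩
      · rintro (hs | ⟨rfl | ht, hy⟩)
        · exact Or.inl (Or.inl hs)
        · exact Or.inl (Or.inr rfl)
        · exact Or.inr ⟨ht, hy⟩
    · simp only [if_neg h]
      constructor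
      · rintro (hs | ⟨ht, hy⟩)
        · exact Or.inl hs
        · exact Or.inr ⟨Or.inr ht, hy⟩
      · rintro (hs | ⟨rfl | ht, hy⟩)
        · exact Or.inl hs
        · exact absurd hy h
        · exact Or.inr ⟨ht, hy⟩


-- one field name's pass over the whole table
lemma mem_tableFold (tbl : List (String × List String)) (fn : String) (s : PySem.Set String) (y : String) :
    y ∈ tbl.foldl (fun s p =>
        p.2.foldl (fun s sig => if PySem.Str.isIn sig fn then PySem.Set.add s sig else s) s) s ↔
      y ∈ s ∨ (y ∈ tbl.flatMap Prod.snd ∧ PySem.Str.isIn y fn) := by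
  induction tbl generalizing s with
  | nil => simp
  | cons p t ih =>
    simp only [List.foldl_cons, ih, mem_condAdd, List.flatMap_cons, List.mem_append]
    tauto


lemma mem_hitFold (field_names : List String) (s0 : PySem.Set String) (y : String) :
    y ∈ field_names.foldl (fun s fn =>
        pvSigTable.foldl (fun s p =>
          p.2.foldl (fun s sig => if PySem.Str.isIn sig fn then PySem.Set.add s sig else s) s) s) s0 ↔
      y ∈ s0 ∨ (y ∈ pvSigTable.flatMap Prod.snd ∧ field_names.any (fun fn => PySem.Str.isIn y fn)) := by
  induction field_names generalizing s0 with
  | nil => simp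
  | cons fn t ih =>
    simp only [List.foldl_cons, List.any_cons, Bool.or_eq_true, ih, mem_tableFold]
    tauto

lemma mem_hit (field_names : List String) (y : String) :
    y ∈ pvHit field_names ↔
      y ∈ pvSigTable.flatMap Prod.snd ∧ field_names.any (fun fn => PySem.Str.isIn y fn) := by
  unfold pvHit
  rw [mem_hitFold]
  simp [PySem.Set.empty]


-- a form's score in B is A's per-form count
lemma len_inter_hit (field_names sigs : List String)
    (hsub : ∀ x ∈ sigs, x ∈ pvSigTable.flatMap Prod.snd) :
    PySem.Set.len (PySem.Set.inter sigs (pvHit field_names)) =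
      (sigs.countP (fun sig => field_names.any (fun fn => PySem.Str.isIn sig fn)) : Int) := by
  unfold PySem.Set.inter PySem.Set.len
  rw [← List.countP_eq_length_filter]
  congr 1
  apply List.countP_congr
  intro x hx
  simp only [PySem.Set.contains_eq_listContains, List.contains_iff_mem,
    mem_hit]
  exact ⟨fun h => h.2, fun h => ⟨hsub x hx, h⟩⟩

-- ===== VERDICT (by name: the statement is the Claim_ definition above) =====
theorem detect_form_number_py_spec : Claim_equal_detect_form_number_py := by
  intro field_names _
  unfold Spec_detect_form_number_py detect_form_number_py detect_form_number_py_alt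
  have h125 := len_inter_hit field_names ["NamedInsured_FullName", "Policy_EffectiveDate", "LOB_"] (by decide)
  have h127 := len_inter_hit field_names ["Driver_GivenName", "Vehicle_VIN", "Driver_BirthDate"] (by decide)
  have h137 := len_inter_hit field_names ["Vehicle_Coverage_", "BusinessAutoSymbol_"] (by decide)
  have h163 := len_inter_hit field_names ["Text15[0]", "Text13[0]", "marital[0]"] (by decide)
  have b125 : (["NamedInsured_FullName", "Policy_EffectiveDate", "LOB_"].countP (fun sig => field_names.any (fun fn => PySem.Str.isIn sig fn))) ≤ 3 := List.countP_le_length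
  have b127 : (["Driver_GivenName", "Vehicle_VIN", "Driver_BirthDate"].countP (fun sig => field_names.any (fun fn => PySem.Str.isIn sig fn))) ≤ 3 := List.countP_le_length
  have b137 : (["Vehicle_Coverage_", "BusinessAutoSymbol_"].countP (fun sig => field_names.any (fun fn => PySem.Str.isIn sig fn))) ≤ 2 := List.countP_le_length
  have b163 : (["Text15[0]", "Text13[0]", "marital[0]"].countP (fun sig => field_names.any (fun fn => PySem.Str.isIn sig fn))) ≤ 3 := List.countP_le_length
  simp only [pvSigTable, List.foldl_cons, List.foldl_nil, List.map_cons, List.map_nil,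
    PySem.List.foldl_count_if, h125, h127, h137, h163]
  generalize (["NamedInsured_FullName", "Policy_EffectiveDate", "LOB_"].countP (fun sig => field_names.any (fun fn => PySem.Str.isIn sig fn))) = a at b125 ⊢
  generalize (["Driver_GivenName", "Vehicle_VIN", "Driver_BirthDate"].countP (fun sig => field_names.any (fun fn => PySem.Str.isIn sig fn))) = b at b127 ⊢
  generalize (["Vehicle_Coverage_", "BusinessAutoSymbol_"].countP (fun sig => field_names.any (fun fn => PySem.Str.isIn sig fn))) = c at b137 ⊢
  generalize (["Text15[0]", "Text13[0]", "marital[0]"].countP (fun sig => field_names.any (fun fn => PySem.Str.isIn sig fn))) = d at b163 ⊢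
  interval_cases a <;> interval_cases b <;> interval_cases c <;> interval_cases d <;> decide
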